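-- pv_equiv track=rewrite | github.com/RahimMirani/code-context | context_agent/integration.py | _toml_sections
-- ===== SOURCE A (Python) =====
-- def _toml_table_name(line: str) -> str | None:
--     stripped = line.strip()
--     if not stripped.startswith("[") or not stripped.endswith("]"):
--         return None
--     if stripped.startswith("[["):
--         return None
--     return stripped[1:-1].strip()
--
-- def _toml_sections(lines: list[str]) -> list[tuple[int, int, str]]:
--     headers: list[tuple[int, str]] = []
--     for index, line in enumerate(lines):
--         table_name = _toml_table_name(line)
--         if table_name is not None:
--             headers.append((index, table_name))
--     sections: list[tuple[int, int, str]] = []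
--     for position, (start, table_name) in enumerate(headers):
--         end = headers[position + 1][0] if position + 1 < len(headers) else len(lines)
--         sections.append((start, end, table_name))
--     return sections
-- ===== SOURCE B (Python) =====
-- def _toml_table_name(line: str) -> str | None:
--     stripped = line.strip()
--     if not stripped.startswith("[") or not stripped.endswith("]"):
--         return None
--     if stripped.startswith("[["):
--         return None
--     return stripped[1:-1].strip()
--
-- def _toml_sections(lines: list[str]) -> list[tuple[int, int, str]]:
--     sections: list[tuple[int, int, str]] = []
--     pending: tuple[int, str] | None = None
--     for index, line in enumerate(lines):
--         table_name = _toml_table_name(line)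
--         if table_name is not None:
--             if pending is not None:
--                 sections.append((pending[0], index, pending[1]))
--             pending = (index, table_name)
--     if pending is not None:
--         sections.append((pending[0], len(lines), pending[1]))
--     return sections
-- ===== Notes on version B (the rewrite author's own statement) =====
-- stated objective: simpler
-- what changed: Replaces A's two-pass scheme (collect all headers, then a second indexed pass computing each section's end via headers[position+1]) with a single pass that keeps one pending open header and closes it at the next header or at end of input.
import Mathlib
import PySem

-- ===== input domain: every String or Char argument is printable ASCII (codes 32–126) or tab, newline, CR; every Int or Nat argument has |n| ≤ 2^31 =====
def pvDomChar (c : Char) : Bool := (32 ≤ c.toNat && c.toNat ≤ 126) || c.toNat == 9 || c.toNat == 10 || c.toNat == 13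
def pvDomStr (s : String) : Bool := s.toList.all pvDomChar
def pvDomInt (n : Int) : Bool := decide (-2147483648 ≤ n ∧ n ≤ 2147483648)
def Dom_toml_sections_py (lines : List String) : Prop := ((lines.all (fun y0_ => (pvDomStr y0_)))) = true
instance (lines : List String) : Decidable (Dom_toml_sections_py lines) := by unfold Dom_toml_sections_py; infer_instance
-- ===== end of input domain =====

-- B is a single pass keeping one pending open header instead of A's two passes (collect headers, then index headers[position+1]); same O(n) cost, simpler shape.

-- ===== PORT A =====
-- _toml_table_name, shared verbatim by A and B
def tomlTableName? (line : String) : Option String :=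
  let stripped := PySem.Str.strip line
  if !(PySem.Str.startswith stripped "[") || !(PySem.Str.endswith stripped "]") then none
  else if PySem.Str.startswith stripped "[[" then none
  else some (PySem.Str.strip (PySem.Str.slice stripped (some 1) (some (-1))))

def toml_sections_py (lines : List String) : List (Int × Int × String) :=
  let headers : List (Int × String) :=
    (PySem.List.enumerate lines 0).foldl (fun acc p =>
      match tomlTableName? p.2 with
      | some name => acc ++ [(p.1, name)]
      | none => acc) []
  (PySem.List.enumerate headers 0).foldl (fun acc q =>
    let endIdx : Int :=
      if q.1 + 1 < (headers.length : Int) then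
        (((PySem.List.pyGet? headers (q.1 + 1)).map Prod.fst).getD 0)   -- in-range access, getD only totalizes
      else (lines.length : Int)
    acc ++ [(q.2.1, endIdx, q.2.2)]) []

-- ===== PORT B =====
def toml_sections_py_alt (lines : List String) : List (Int × Int × String) :=
  let st :=
    (PySem.List.enumerate lines 0).foldl
      (fun (st : List (Int × Int × String) × Option (Int × String)) p =>
        match tomlTableName? p.2 with
        | some name =>
          match st.2 with
          | some pend => (st.1 ++ [(pend.1, p.1, pend.2)], some (p.1, name))
          | none => (st.1, some (p.1, name))
        | none => st)
      ([], none)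
  match st with
  | (s, some pend) => s ++ [(pend.1, (lines.length : Int), pend.2)]
  | (s, none) => s

-- ===== PRECONDITION & SPEC =====
def Spec_toml_sections_py (lines : List String) (out : List (Int × Int × String)) : Prop := out = toml_sections_py_alt lines
instance (lines : List String) (out : List (Int × Int × String)) : Decidable (Spec_toml_sections_py lines out) := by unfold Spec_toml_sections_py; infer_instance

-- ===== CLAIM (what is proved, stated in full; the proofs are below) =====
def Claim_equal_toml_sections_py : Prop := ∀ (lines : List String), Dom_toml_sections_py lines → Spec_toml_sections_py lines (toml_sections_py lines)

-- ===== LEMMAS AND PROOFS =====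

-- the list of (index, name) headers collected from `lines` starting at index i
def headersOf (lines : List String) (i : Int) : List (Int × String) :=
  match lines with
  | [] => []
  | l :: ls =>
    match tomlTableName? l with
    | some n => (i, n) :: headersOf ls (i + 1)
    | none => headersOf ls (i + 1)

-- sections produced from a chain of headers with one open header x, closed at L
def secChain (x : Int × String) (hs : List (Int × String)) (L : Int) : List (Int × Int × String) :=
  match hs with
  | [] => [(x.1, L, x.2)]
  | y :: t => (x.1, y.1, x.2) :: secChain y t L

def secTop (hs : List (Int × String)) (L : Int) : List (Int × Int × String) :=
  match hs with
  | [] => []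
  | x :: t => secChain x t L

theorem headersOf_A (lines : List String) : ∀ (i : Int) (acc : List (Int × String)),
    (PySem.List.enumerate lines i).foldl (fun acc p =>
      match tomlTableName? p.2 with
      | some name => acc ++ [(p.1, name)]
      | none => acc) acc = acc ++ headersOf lines i := by
  induction lines with
  | nil => intro i acc; simp [PySem.List.enumerate_nil, headersOf]
  | cons l ls ih =>
    intro i acc
    rw [PySem.List.enumerate_cons]
    simp only [List.foldl_cons]
    cases h : tomlTableName? l <;> simp [headersOf, h, ih]

theorem secChain_length (x : Int × String) (hs : List (Int × String)) (L : Int) :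
    (secChain x hs L).length = hs.length + 1 := by
  induction hs generalizing x with
  | nil => simp [secChain]
  | cons y t ih => simp [secChain, ih]

theorem secChain_getElem (x : Int × String) (hs : List (Int × String)) (L : Int)
    (k : Nat) (hk : k < hs.length + 1) :
    (secChain x hs L)[k]'(by rw [secChain_length]; omega) =
      ((x :: hs)[k]'(by simpa using hk) |>.1,
       (if h : k + 1 < hs.length + 1 then ((x :: hs)[k+1]'(by simpa using h)).1 else L),
       ((x :: hs)[k]'(by simpa using hk)).2) := by
  induction hs generalizing x k with
  | nil =>
    cases k with
    | zero => simp [secChain]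
    | succ k => simp at hk
  | cons y t ih =>
    cases k with
    | zero => simp [secChain]
    | succ k =>
      simp only [secChain, List.getElem_cons_succ, List.length_cons]
      rw [ih y k (by simpa using hk)]
      split_ifs <;> first | rfl | (exfalso; omega)

theorem secB_run (lines : List String) : ∀ (i : Int) (secs : List (Int × Int × String))
    (pend : Option (Int × String)) (L : Int),
    (match ((PySem.List.enumerate lines i).foldl
      (fun (st : List (Int × Int × String) × Option (Int × String)) p =>
        match tomlTableName? p.2 with
        | some name =>
          match st.2 with
          | some pend => (st.1 ++ [(pend.1, p.1, pend.2)], some (p.1, name))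
          | none => (st.1, some (p.1, name))
        | none => st)
      (secs, pend)) with
     | (s, some x) => s ++ [(x.1, L, x.2)]
     | (s, none) => s) =
    secs ++ (match pend with
             | some x => secChain x (headersOf lines i) L
             | none => secTop (headersOf lines i) L) := by
  induction lines with
  | nil =>
    intro i secs pend L
    cases pend <;> simp [PySem.List.enumerate_nil, headersOf, secTop, secChain]
  | cons l ls ih =>
    intro i secs pend L
    rw [PySem.List.enumerate_cons]
    simp only [List.foldl_cons]
    cases h : tomlTableName? l with
    | none => cases pend <;> simp [headersOf, h, ih]
    | some n =>
      cases pend with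
      | none => simp [headersOf, h, ih, secTop]
      | some x => simp [headersOf, h, ih, secChain]

theorem secA_eq_secTop (hs : List (Int × String)) (L : Int) :
    (PySem.List.enumerate hs 0).foldl (fun acc q =>
      let endIdx : Int :=
        if q.1 + 1 < (hs.length : Int) then
          (((PySem.List.pyGet? hs (q.1 + 1)).map Prod.fst).getD 0)
        else L
      acc ++ [(q.2.1, endIdx, q.2.2)]) [] = secTop hs L := by
  show (PySem.List.enumerate hs 0).foldl (fun acc q =>
      acc ++ [(q.2.1,
        (if q.1 + 1 < (hs.length : Int) then
          (((PySem.List.pyGet? hs (q.1 + 1)).map Prod.fst).getD 0)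
        else L), q.2.2)]) [] = secTop hs L
  rw [PySem.List.foldl_append_singleton_eq_map]
  simp only [List.nil_append]
  cases hs with
  | nil => simp [PySem.List.enumerate_nil, secTop]
  | cons x t =>
    apply List.ext_getElem
    · simp [PySem.List.length_enumerate, secTop, secChain_length]
    · intro k hk1 hk2
      have hk : k < t.length + 1 := by
        simpa [PySem.List.length_enumerate] using hk1
      simp only [List.getElem_map, PySem.List.getElem_enumerate, zero_add, secTop]
      rw [secChain_getElem x t L k hk]
      by_cases h : k + 1 < t.length + 1
      · have hc : ((k : Int)) + 1 < (((x :: t).length : Nat) : Int) := by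
          simp only [List.length_cons]; push_cast; omega
        have hcast : ((k : Int)) + 1 = (((k + 1 : Nat) : Nat) : Int) := by push_cast; ring
        have hlt : k + 1 < (x :: t).length := by simpa using h
        rw [if_pos hc, dif_pos h, hcast, PySem.List.pyGet?_natCast,
          List.getElem?_eq_getElem hlt]
        rfl
      · have hc : ¬ (((k : Int)) + 1 < (((x :: t).length : Nat) : Int)) := by
          simp only [List.length_cons]; push_cast; omega
        have h' : ¬ k < t.length := by omega
        simp [h']

-- ===== VERDICT (by name: the statement is the Claim_ definition above) =====
theorem toml_sections_py_spec : Claim_equal_toml_sections_py := by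
  intro lines _
  unfold Spec_toml_sections_py
  simp only [toml_sections_py, toml_sections_py_alt]
  rw [headersOf_A lines 0 []]
  simp only [List.nil_append]
  rw [secA_eq_secTop (headersOf lines 0) ((lines.length : Nat) : Int)]
  have h := secB_run lines 0 [] none ((lines.length : Nat) : Int)
  simp only [List.nil_append] at h
  exact h.symm
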